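-- pv_equiv track=rewrite | github.com/nkossally/leet_code | Python/2592 minimum-number-of-coins-to-be-add.py | minimumAddedCoinsSlow
-- ===== SOURCE A (Python) =====
-- from typing import List
--
-- def minimumAddedCoinsSlow(coins: List[int], target: int) -> int:
--     def get_coin_needed(curr_val, idx, curr_target):
--         if curr_val > curr_target:
--             return curr_target
--         if curr_val == curr_target:
--             return 0
--
--         if idx == len(coins):
--             return curr_target
--
--         val_1 = get_coin_needed(curr_val + coins[idx], idx + 1, curr_target)
--         val_2 = get_coin_needed(curr_val, idx + 1, curr_target)
--         return min(val_1, val_2)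
--
--     count = 0
--     for num in range(1, target + 1):
--         coin_needed = get_coin_needed(0, 0, num)
--
--         if coin_needed > 0:
--             coins.append(coin_needed)
--             count += 1
--     return count
-- ===== SOURCE B (Python) =====
-- from typing import List
--
-- def minimumAddedCoinsSlow(coins: List[int], target: int) -> int:
--     cur = list(coins)
--     count = 0
--     for num in range(1, target + 1):
--         sums = {0}
--         for c in cur:
--             sums |= {s + c for s in sums if s + c <= num}
--         if num not in sums:
--             cur.append(num)
--             count += 1
--     return count
-- ===== Notes on version B (the rewrite author's own statement) =====
-- stated objective: faster
-- what changed: Replaces A's exponential recursive subset-sum search (re-run for every num in 1..target) by a per-num dynamic-programming set of partial subset sums capped at num, built in one left-to-right pass over the coin list.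
import Mathlib
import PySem

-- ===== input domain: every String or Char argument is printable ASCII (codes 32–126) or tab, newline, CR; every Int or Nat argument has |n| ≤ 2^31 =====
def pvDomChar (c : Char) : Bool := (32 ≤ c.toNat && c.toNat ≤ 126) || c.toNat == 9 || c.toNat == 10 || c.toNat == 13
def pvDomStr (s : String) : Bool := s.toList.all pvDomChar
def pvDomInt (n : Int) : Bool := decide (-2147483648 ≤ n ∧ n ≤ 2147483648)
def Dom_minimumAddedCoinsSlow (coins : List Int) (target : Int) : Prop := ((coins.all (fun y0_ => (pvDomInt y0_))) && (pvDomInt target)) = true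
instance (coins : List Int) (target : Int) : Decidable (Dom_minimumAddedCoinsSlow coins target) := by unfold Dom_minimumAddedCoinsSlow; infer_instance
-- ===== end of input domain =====

-- B replaces A's per-value exponential subset-sum recursion by a per-num dynamic-programming set
-- of partial subset sums capped at num.  Note: the Python A appends the patch coins to the
-- caller's `coins` list in place; the equivalence proved here is about the RETURN value only
-- (B keeps its working copy and does not mutate the argument).

-- ===== PORT A =====
-- A's inner `get_coin_needed(curr_val, idx, curr_target)`: the index walk over `coins[idx:]`
-- becomes structural recursion over the remaining suffix, branches in source order.
def pvGetCoinNeeded (curr_val : Int) (rest : List Int) (curr_target : Int) : Int :=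
  if curr_val > curr_target then curr_target
  else if curr_val = curr_target then 0
  else
    match rest with
    | [] => curr_target
    | c :: rest' =>
        min (pvGetCoinNeeded (curr_val + c) rest' curr_target)
            (pvGetCoinNeeded curr_val rest' curr_target)

-- A's main loop: state = (current coins list, count), iterating over range(1, target+1).
def pvALoop (coins : List Int) (count : Int) (nums : List Int) : Int :=
  match nums with
  | [] => count
  | num :: rest =>
      let coin_needed := pvGetCoinNeeded 0 coins num
      if coin_needed > 0 then pvALoop (coins ++ [coin_needed]) (count + 1) rest
      else pvALoop coins count rest

def minimumAddedCoinsSlow (coins : List Int) (target : Int) : Int :=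
  pvALoop coins 0 (PySem.List.pyRange 1 (target + 1) 1)

-- ===== PORT B =====
-- `sums |= {s + c for s in sums if s + c <= num}`
def pvAddCoin (sums : PySem.Set Int) (c : Int) (num : Int) : PySem.Set Int :=
  PySem.Set.union sums
    (PySem.Set.ofList ((sums.filter (fun s => s + c ≤ num)).map (fun s => s + c)))

def minimumAddedCoinsSlow_alt (coins : List Int) (target : Int) : Int :=
  ((PySem.List.pyRange 1 (target + 1) 1).foldl
    (fun (st : List Int × Int) num =>
      let sums : PySem.Set Int :=
        st.1.foldl (fun sums c => pvAddCoin sums c num) (PySem.Set.ofList [0])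
      if num ∈ sums then st else (st.1 ++ [num], st.2 + 1))
    (coins, 0)).2

-- ===== PRECONDITION & SPEC =====
def Spec_minimumAddedCoinsSlow (coins : List Int) (target : Int) (out : Int) : Prop := out = minimumAddedCoinsSlow_alt coins target
instance (coins : List Int) (target : Int) (out : Int) : Decidable (Spec_minimumAddedCoinsSlow coins target out) := by unfold Spec_minimumAddedCoinsSlow; infer_instance

-- ===== CLAIM (what is proved, stated in full; the proofs are below) =====
def Claim_equal_minimumAddedCoinsSlow : Prop := ∀ (coins : List Int) (target : Int), Dom_minimumAddedCoinsSlow coins target → Spec_minimumAddedCoinsSlow coins target (minimumAddedCoinsSlow coins target)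

-- ===== LEMMAS AND PROOFS =====

-- "from running value cv, some choice over the remaining coins reaches exactly t
--  with every intermediate running value ≤ t" — the search A's recursion performs
def BReach (t : Int) : List Int → Int → Prop
  | [], cv => cv = t
  | c :: r, cv => cv = t ∨ (cv + c ≤ t ∧ BReach t r (cv + c)) ∨ BReach t r cv

lemma breach_self (t : Int) : ∀ cs : List Int, BReach t cs t
  | [] => rfl
  | _ :: _ => Or.inl rfl

lemma gcn_of_gt {curr_val t : Int} (rest : List Int) (h : curr_val > t) :
    pvGetCoinNeeded curr_val rest t = t := by
  unfold pvGetCoinNeeded; rw [if_pos h]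

lemma gcn_of_eq {curr_val t : Int} (rest : List Int) (h : curr_val = t) :
    pvGetCoinNeeded curr_val rest t = 0 := by
  unfold pvGetCoinNeeded; rw [if_neg (by omega), if_pos h]

lemma gcn_nil {curr_val t : Int} (h1 : ¬ curr_val > t) (h2 : curr_val ≠ t) :
    pvGetCoinNeeded curr_val [] t = t := by
  unfold pvGetCoinNeeded; rw [if_neg h1, if_neg h2]

lemma gcn_cons {curr_val t : Int} (c : Int) (rest' : List Int)
    (h1 : ¬ curr_val > t) (h2 : curr_val ≠ t) :
    pvGetCoinNeeded curr_val (c :: rest') t =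
      min (pvGetCoinNeeded (curr_val + c) rest' t) (pvGetCoinNeeded curr_val rest' t) := by
  conv_lhs => rw [pvGetCoinNeeded]
  rw [if_neg h1, if_neg h2]

-- get_coin_needed returns 0 or curr_target
lemma gcn_cases (curr_val : Int) (rest : List Int) (t : Int) :
    pvGetCoinNeeded curr_val rest t = 0 ∨ pvGetCoinNeeded curr_val rest t = t := by
  induction rest generalizing curr_val with
  | nil => unfold pvGetCoinNeeded; split_ifs <;> simp
  | cons c rest' ih =>
      unfold pvGetCoinNeeded
      split_ifs with h1 h2
      · right; rfl
      · left; rfl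
      · rcases ih (curr_val + c) with h | h <;> rcases ih curr_val with h' | h' <;>
          simp [h, h'] <;> omega

-- A's recursion succeeds exactly on the bounded reachability predicate
lemma gcn_eq_zero_iff {t : Int} (ht : 0 < t) :
    ∀ (rest : List Int) (curr_val : Int),
      pvGetCoinNeeded curr_val rest t = 0 ↔ (curr_val ≤ t ∧ BReach t rest curr_val) := by
  intro rest
  induction rest with
  | nil =>
      intro cv
      by_cases h1 : cv > t
      · rw [gcn_of_gt [] h1]
        constructor
        · intro h0; exact absurd h0 (by omega)
        · intro h; omega
      · by_cases h2 : cv = t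
        · rw [gcn_of_eq [] h2]
          exact ⟨fun _ => ⟨by omega, h2⟩, fun _ => rfl⟩
        · rw [gcn_nil h1 h2]
          constructor
          · intro h0; exact absurd h0 (by omega)
          · rintro ⟨_, h⟩; exact absurd h h2
  | cons c rest' ih =>
      intro cv
      by_cases h1 : cv > t
      · rw [gcn_of_gt _ h1]
        constructor
        · intro h0; exact absurd h0 (by omega)
        · intro h; omega
      · by_cases h2 : cv = t
        · rw [gcn_of_eq _ h2]
          exact ⟨fun _ => ⟨by omega, h2 ▸ breach_self t _⟩, fun _ => rfl⟩
        · rw [gcn_cons c rest' h1 h2]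
          have c1 := gcn_cases (cv + c) rest' t
          have c2 := gcn_cases cv rest' t
          have e1 := ih (cv + c)
          have e2 := ih cv
          constructor
          · intro h
            have hor : pvGetCoinNeeded (cv + c) rest' t = 0 ∨
                pvGetCoinNeeded cv rest' t = 0 := by omega
            refine ⟨by omega, ?_⟩
            rcases hor with h0 | h0
            · rcases e1.mp h0 with ⟨hle, hb⟩
              exact Or.inr (Or.inl ⟨hle, hb⟩)
            · exact Or.inr (Or.inr (e2.mp h0).2)
          · rintro ⟨hle, hb | ⟨hle', hb⟩ | hb⟩
            · exact absurd hb h2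
            · have h0 := e1.mpr ⟨hle', hb⟩
              omega
            · have h0 := e2.mpr ⟨hle, hb⟩
              omega

-- membership in one DP step
lemma mem_pvAddCoin (sums : PySem.Set Int) (c num v : Int) :
    v ∈ pvAddCoin sums c num ↔ v ∈ sums ∨ ∃ s ∈ sums, s + c ≤ num ∧ v = s + c := by
  simp only [pvAddCoin, PySem.Set.mem_union, PySem.Set.mem_ofList, List.mem_map,
    List.mem_filter]
  constructor
  · rintro (h | ⟨s, ⟨hs, hle⟩, rfl⟩)
    · exact Or.inl h
    · exact Or.inr ⟨s, hs, by simpa using hle, rfl⟩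
  · rintro (h | ⟨s, hs, hle, rfl⟩)
    · exact Or.inl h
    · exact Or.inr ⟨s, ⟨hs, by simpa using hle⟩, rfl⟩

-- one DP step tracks one step of the bounded reachability search
lemma breach_step (t c : Int) (cs : List Int) (sums : PySem.Set Int) :
    (∃ cv ∈ sums, BReach t (c :: cs) cv) ↔ (∃ cv ∈ pvAddCoin sums c t, BReach t cs cv) := by
  constructor
  · rintro ⟨cv, hcv, h | ⟨hle, hb⟩ | hb⟩
    · exact ⟨cv, (mem_pvAddCoin sums c t cv).mpr (Or.inl hcv), h ▸ breach_self t cs⟩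
    · exact ⟨cv + c, (mem_pvAddCoin sums c t (cv + c)).mpr (Or.inr ⟨cv, hcv, hle, rfl⟩), hb⟩
    · exact ⟨cv, (mem_pvAddCoin sums c t cv).mpr (Or.inl hcv), hb⟩
  · rintro ⟨cv, hcv, hb⟩
    rcases (mem_pvAddCoin sums c t cv).mp hcv with h | ⟨s, hs, hle, rfl⟩
    · exact ⟨cv, h, Or.inr (Or.inr hb)⟩
    · exact ⟨s, hs, Or.inr (Or.inl ⟨hle, hb⟩)⟩

-- the whole DP fold decides bounded reachability
lemma dp_fold (t : Int) :
    ∀ (cs : List Int) (sums : PySem.Set Int),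
      (t ∈ cs.foldl (fun sums c => pvAddCoin sums c t) sums) ↔ ∃ cv ∈ sums, BReach t cs cv := by
  intro cs
  induction cs with
  | nil =>
      intro sums
      simp only [List.foldl_nil]
      constructor
      · intro h; exact ⟨t, h, rfl⟩
      · rintro ⟨cv, hcv, h⟩; exact (show cv = t from h) ▸ hcv
  | cons c cs' ih =>
      intro sums
      rw [List.foldl_cons, ih, ← breach_step]

-- per-num agreement of the two reachability tests
lemma test_agree (cur : List Int) (num : Int) (hnum : 0 < num) :
    pvGetCoinNeeded 0 cur num = 0 ↔
      num ∈ cur.foldl (fun sums c => pvAddCoin sums c num) (PySem.Set.ofList [0]) := by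
  rw [gcn_eq_zero_iff hnum, dp_fold]
  constructor
  · rintro ⟨_, hb⟩
    exact ⟨0, by simp [PySem.Set.mem_ofList], hb⟩
  · rintro ⟨cv, hcv, hb⟩
    simp only [PySem.Set.mem_ofList, List.mem_singleton] at hcv
    exact ⟨by omega, hcv ▸ hb⟩

-- main bisimulation between A's loop and B's fold: the (coins, count) states coincide
lemma loop_eq :
    ∀ (nums : List Int) (cur : List Int) (count : Int),
      (∀ n ∈ nums, 0 < n) →
      pvALoop cur count nums =
        (nums.foldl
          (fun (st : List Int × Int) num =>
            let sums : PySem.Set Int :=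
              st.1.foldl (fun sums c => pvAddCoin sums c num) (PySem.Set.ofList [0])
            if num ∈ sums then st else (st.1 ++ [num], st.2 + 1))
          (cur, count)).2 := by
  intro nums
  induction nums with
  | nil => intro cur count _; rfl
  | cons num rest ih =>
      intro cur count hnums
      have hn : 0 < num := hnums num (by simp)
      have hrest : ∀ n ∈ rest, 0 < n := fun n h => hnums n (by simp [h])
      have hiff := test_agree cur num hn
      have hcases := gcn_cases 0 cur num
      unfold pvALoop
      simp only [List.foldl_cons]
      by_cases hmem : num ∈ cur.foldl (fun sums c => pvAddCoin sums c num) (PySem.Set.ofList [0])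
      · rw [if_neg (by have := hiff.mpr hmem; omega), if_pos hmem]
        exact ih cur count hrest
      · have h0 : pvGetCoinNeeded 0 cur num = num := by
          rcases hcases with h | h
          · exact absurd (hiff.mp h) hmem
          · exact h
        rw [h0, if_pos hn, if_neg hmem]
        exact ih (cur ++ [num]) (count + 1) hrest

-- ===== VERDICT (by name: the statement is the Claim_ definition above) =====
theorem minimumAddedCoinsSlow_spec : Claim_equal_minimumAddedCoinsSlow := by
  intro coins target _
  unfold Spec_minimumAddedCoinsSlow minimumAddedCoinsSlow minimumAddedCoinsSlow_alt
  exact loop_eq (PySem.List.pyRange 1 (target + 1) 1) coins 0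
    (fun n hn => by
      rcases (PySem.List.mem_pyRange_one).mp hn with ⟨h1, _⟩
      omega)
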